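-- pv_equiv track=rewrite | github.com/Akchhya1108/heritage_doc_recomm | src/2_extract_metadata.py | determine_tangibility
-- ===== SOURCE A (Python) =====
-- def determine_tangibility(heritage_types):
--     """Determine if heritage is tangible or intangible"""
--     tangible = ['monument', 'site', 'artifact', 'architecture']
--     intangible = ['tradition', 'art']
--
--     if any(t in tangible for t in heritage_types):
--         return 'tangible'
--     elif any(t in intangible for t in heritage_types):
--         return 'intangible'
--     return 'tangible'  # default
-- ===== SOURCE B (Python) =====
-- def determine_tangibility(heritage_types):
--     """Determine if heritage is tangible or intangible"""
--     tangible = {'monument', 'site', 'artifact', 'architecture'}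
--     intangible = {'tradition', 'art'}
--     saw_intangible = False
--     for t in heritage_types:
--         if t in tangible:
--             return 'tangible'
--         if t in intangible:
--             saw_intangible = True
--     return 'intangible' if saw_intangible else 'tangible'
-- ===== Notes on version B (the rewrite author's own statement) =====
-- stated objective: alternative
-- what changed: Replaced the two separate any() scans over heritage_types with a single early-return pass maintaining a saw_intangible flag, and list membership with set membership.
import Mathlib
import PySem

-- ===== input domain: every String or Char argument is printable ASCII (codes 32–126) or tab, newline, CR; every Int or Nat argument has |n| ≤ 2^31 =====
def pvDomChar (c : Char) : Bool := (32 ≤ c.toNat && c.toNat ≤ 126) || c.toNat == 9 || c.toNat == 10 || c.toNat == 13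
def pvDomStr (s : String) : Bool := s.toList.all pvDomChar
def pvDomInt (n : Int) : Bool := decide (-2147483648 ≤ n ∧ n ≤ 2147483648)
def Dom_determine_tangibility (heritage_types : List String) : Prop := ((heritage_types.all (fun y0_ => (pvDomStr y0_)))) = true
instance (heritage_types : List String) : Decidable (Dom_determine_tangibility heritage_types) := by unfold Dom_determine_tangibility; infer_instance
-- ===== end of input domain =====

-- B merges A's two any() scans into one early-return pass with a saw_intangible flag (alternative decomposition, same cost).

-- ===== PORT A =====
def determine_tangibility (heritage_types : List String) : String :=
  let tangible : List String := ["monument", "site", "artifact", "architecture"]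
  let intangible : List String := ["tradition", "art"]
  if heritage_types.any (fun t => tangible.contains t) then "tangible"
  else if heritage_types.any (fun t => intangible.contains t) then "intangible"
  else "tangible"

-- ===== PORT B =====
-- single pass: early return "tangible", otherwise remember whether an intangible type was seen
def determine_tangibility_alt_loop (ts : List String) (sawIntangible : Bool) : String :=
  match ts with
  | [] => if sawIntangible then "intangible" else "tangible"
  | t :: rest =>
      if (PySem.Set.ofList ["monument", "site", "artifact", "architecture"]).contains t then "tangible"
      else if (PySem.Set.ofList ["tradition", "art"]).contains t then
        determine_tangibility_alt_loop rest true
      else determine_tangibility_alt_loop rest sawIntangible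

def determine_tangibility_alt (heritage_types : List String) : String :=
  determine_tangibility_alt_loop heritage_types false

-- ===== PRECONDITION & SPEC =====
def Spec_determine_tangibility (heritage_types : List String) (out : String) : Prop := out = determine_tangibility_alt heritage_types
instance (heritage_types : List String) (out : String) : Decidable (Spec_determine_tangibility heritage_types out) := by unfold Spec_determine_tangibility; infer_instance

-- ===== CLAIM (what is proved, stated in full; the proofs are below) =====
def Claim_equal_determine_tangibility : Prop := ∀ (heritage_types : List String), Dom_determine_tangibility heritage_types → Spec_determine_tangibility heritage_types (determine_tangibility heritage_types)

-- ===== LEMMAS AND PROOFS =====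

theorem alt_loop_char (ts : List String) (saw : Bool) :
    determine_tangibility_alt_loop ts saw =
      (if ts.any (fun t => (["monument", "site", "artifact", "architecture"] : List String).contains t) then "tangible"
       else if saw || ts.any (fun t => (["tradition", "art"] : List String).contains t) then "intangible"
       else "tangible") := by
  induction ts generalizing saw with
  | nil => simp [determine_tangibility_alt_loop]
  | cons t rest ih =>
    have e1 : PySem.Set.ofList ["monument", "site", "artifact", "architecture"] =
        (["monument", "site", "artifact", "architecture"] : List String) := by rfl
    have e2 : PySem.Set.ofList ["tradition", "art"] = (["tradition", "art"] : List String) := by rfl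
    cases hc1 : (["monument", "site", "artifact", "architecture"] : List String).contains t with
    | true =>
      have h1 : t = "monument" ∨ t = "site" ∨ t = "artifact" ∨ t = "architecture" := by
        simpa using hc1
      simp [determine_tangibility_alt_loop, e1, h1]
    | false =>
      have h1 : ¬(t = "monument" ∨ t = "site" ∨ t = "artifact" ∨ t = "architecture") := by
        simpa using hc1
      cases hc2 : (["tradition", "art"] : List String).contains t with
      | true =>
        have h2 : t = "tradition" ∨ t = "art" := by simpa using hc2
        simp [determine_tangibility_alt_loop, e1, e2, h1, h2, ih]
      | false =>
        have h2 : ¬(t = "tradition" ∨ t = "art") := by simpa using hc2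
        simp [determine_tangibility_alt_loop, e1, e2, h1, h2, ih]

-- ===== VERDICT (by name: the statement is the Claim_ definition above) =====
theorem determine_tangibility_spec : Claim_equal_determine_tangibility := by
  intro ht _
  unfold Spec_determine_tangibility determine_tangibility determine_tangibility_alt
  rw [alt_loop_char]
  simp
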